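-- pv_equiv track=rewrite | github.com/p-marques/w3-strings-go-faster | src/w3-strings-go-faster.py | get_args_values
-- ===== SOURCE A (Python) =====
-- def get_args_values(args: list) -> (str, str, str):
--     size = len(args)
--     encoder: str = None
--     source: str = None
--     destination: str = None
--
--     i = 0
--     for arg in args:
--         if arg == "-e" and (i + 1) < size:
--             encoder = args[i + 1]
--         elif arg == "-s" and (i + 1) < size:
--             source = args[i + 1]
--         elif arg == "-o" and (i + 1) < size:
--             destination = args[i + 1]
--
--         i += 1
--
--     return (encoder, source, destination)
-- ===== SOURCE B (Python) =====
-- def get_args_values(args: list) -> (str, str, str):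
--     # Three independent backward searches: for each flag, scan from the end
--     # and return the value after its last occurrence (a flag in the final
--     # position has no following value, so index len(args)-2 is the highest start).
--     def last_value(flag):
--         for i in range(len(args) - 2, -1, -1):
--             if args[i] == flag:
--                 return args[i + 1]
--         return None
--     return (last_value("-e"), last_value("-s"), last_value("-o"))
-- ===== Notes on version B (the rewrite author's own statement) =====
-- stated objective: alternative
-- what changed: Replaces A's single forward stateful scan (index counter, bounds check, three-branch if/elif updating three accumulators) with three independent backward searches that early-return the value right after the last occurrence of each flag.
import Mathlib
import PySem

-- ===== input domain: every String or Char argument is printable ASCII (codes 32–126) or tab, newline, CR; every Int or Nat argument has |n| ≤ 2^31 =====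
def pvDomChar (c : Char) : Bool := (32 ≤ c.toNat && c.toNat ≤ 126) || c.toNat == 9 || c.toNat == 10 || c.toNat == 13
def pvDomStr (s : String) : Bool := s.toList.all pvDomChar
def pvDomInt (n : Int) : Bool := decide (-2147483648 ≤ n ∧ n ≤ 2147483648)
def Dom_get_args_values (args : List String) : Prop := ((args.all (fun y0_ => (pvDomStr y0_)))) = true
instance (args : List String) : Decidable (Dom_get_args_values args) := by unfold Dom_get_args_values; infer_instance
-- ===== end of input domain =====

-- B replaces A's single forward stateful scan (index counter, bounds check, three-branch
-- if/elif updating three accumulators) with three independent backward searches that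
-- early-return the value after the last occurrence of each flag; objective: alternative.

-- ===== PORT A =====
-- state = (encoder, source, destination, i); args[i+1] read via pyGet? (in range whenever the guard holds)
def get_args_values (args : List String) : Option String × Option String × Option String :=
  let size : Int := args.length
  let st := args.foldl (fun (st : Option String × Option String × Option String × Int) arg =>
    if arg = "-e" ∧ st.2.2.2 + 1 < size then (PySem.List.pyGet? args (st.2.2.2 + 1), st.2.1, st.2.2.1, st.2.2.2 + 1)
    else if arg = "-s" ∧ st.2.2.2 + 1 < size then (st.1, PySem.List.pyGet? args (st.2.2.2 + 1), st.2.2.1, st.2.2.2 + 1)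
    else if arg = "-o" ∧ st.2.2.2 + 1 < size then (st.1, st.2.1, PySem.List.pyGet? args (st.2.2.2 + 1), st.2.2.2 + 1)
    else (st.1, st.2.1, st.2.2.1, st.2.2.2 + 1)) (none, none, none, 0)
  (st.1, st.2.1, st.2.2.1)

-- ===== PORT B =====
-- last_value: the for-loop over range(len(args)-2, -1, -1) with an early return becomes
-- findSome? over the reversed index list (List.range (len-1)).reverse, which is that same
-- index sequence; indices i and i+1 are always in range there, so getD's default is never used.
def pvLastValue (args : List String) (flag : String) : Option String :=
  ((List.range (args.length - 1)).reverse).findSome? (fun i =>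
    if args.getD i "" = flag then some (args.getD (i + 1) "") else none)

def get_args_values_alt (args : List String) : Option String × Option String × Option String :=
  (pvLastValue args "-e", pvLastValue args "-s", pvLastValue args "-o")

-- ===== PRECONDITION & SPEC =====
def Spec_get_args_values (args : List String) (out : Option String × Option String × Option String) : Prop := out = get_args_values_alt args
instance (args : List String) (out : Option String × Option String × Option String) : Decidable (Spec_get_args_values args out) := by unfold Spec_get_args_values; infer_instance

-- ===== CLAIM (what is proved, stated in full; the proofs are below) =====
def Claim_equal_get_args_values : Prop := ∀ (args : List String), Dom_get_args_values args → Spec_get_args_values args (get_args_values args)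

-- ===== LEMMAS AND PROOFS =====

-- the adjacent-pair step A's fold reduces to
def pvStep (t : Option String × Option String × Option String) (p : String × String) :
    Option String × Option String × Option String :=
  if p.1 = "-e" then (some p.2, t.2.1, t.2.2)
  else if p.1 = "-s" then (t.1, some p.2, t.2.2)
  else if p.1 = "-o" then (t.1, t.2.1, some p.2)
  else t

def pvG (f : String) (p : String × String) : Option String :=
  if p.1 = f then some p.2 else none

lemma pvA_fold (full : List String) :
    ∀ (l pre : List String) (e s o : Option String), full = pre ++ l →
    l.foldl (fun (st : Option String × Option String × Option String × Int) arg =>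
      if arg = "-e" ∧ st.2.2.2 + 1 < (full.length : Int) then (PySem.List.pyGet? full (st.2.2.2 + 1), st.2.1, st.2.2.1, st.2.2.2 + 1)
      else if arg = "-s" ∧ st.2.2.2 + 1 < (full.length : Int) then (st.1, PySem.List.pyGet? full (st.2.2.2 + 1), st.2.2.1, st.2.2.2 + 1)
      else if arg = "-o" ∧ st.2.2.2 + 1 < (full.length : Int) then (st.1, st.2.1, PySem.List.pyGet? full (st.2.2.2 + 1), st.2.2.2 + 1)
      else (st.1, st.2.1, st.2.2.1, st.2.2.2 + 1)) (e, s, o, (pre.length : Int))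
    = (fun t => (t.1, t.2.1, t.2.2, (full.length : Int))) ((l.zip l.tail).foldl pvStep (e, s, o)) := by
  intro l
  induction l with
  | nil =>
    intro pre e s o h
    simp [h]
  | cons x rest ih =>
    intro pre e s o h
    cases rest with
    | nil =>
      subst h
      simp
    | cons y rest' =>
      have hlen : full.length = pre.length + 2 + rest'.length := by
        subst h; simp; omega
      have hguard : (pre.length : Int) + 1 < (full.length : Int) := by
        rw [hlen]; push_cast; omega
      have hget : PySem.List.pyGet? full ((pre.length : Int) + 1) = some y := by
        have hcast : ((pre.length : Int) + 1) = ((pre.length + 1 : ℕ) : Int) := by push_cast; ring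
        rw [hcast, PySem.List.pyGet?_natCast]
        subst h
        rw [List.getElem?_append_right (by simp)]
        simp
      have hih := ih (pre ++ [x])
      have hpre : ((pre ++ [x]).length : Int) = (pre.length : Int) + 1 := by simp
      rw [hpre] at hih
      have hfull' : full = (pre ++ [x]) ++ y :: rest' := by simp [h]
      rw [List.foldl_cons]
      by_cases h1 : x = "-e"
      · subst h1
        rw [if_pos ⟨rfl, hguard⟩]
        simp only []
        rw [hih _ s o hfull']
        simp [pvStep, hget]
      · by_cases h2 : x = "-s"
        · subst h2
          rw [if_neg (by simp), if_pos ⟨rfl, hguard⟩]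
          simp only []
          rw [hih e _ o hfull']
          simp [pvStep, hget]
        · by_cases h3 : x = "-o"
          · subst h3
            rw [if_neg (by simp), if_neg (by simp), if_pos ⟨rfl, hguard⟩]
            simp only []
            rw [hih e s _ hfull']
            simp [pvStep, hget]
          · rw [if_neg (by simp [h1]), if_neg (by simp [h2]), if_neg (by simp [h3])]
            simp only []
            rw [hih e s o hfull']
            simp [pvStep, h1, h2, h3]

-- the fold's three components are 'value after the last matching pair, else the seed'
lemma pvFold_or (ps : List (String × String)) (e s o : Option String) :
    ps.foldl pvStep (e, s, o)
      = ((ps.reverse.findSome? (pvG "-e")).or e,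
         (ps.reverse.findSome? (pvG "-s")).or s,
         (ps.reverse.findSome? (pvG "-o")).or o) := by
  induction ps generalizing e s o with
  | nil => rfl
  | cons p rest ih =>
    rw [List.foldl_cons]
    have hstep : pvStep (e, s, o) p = ((pvG "-e" p).or e, (pvG "-s" p).or s, (pvG "-o" p).or o) := by
      by_cases h1 : p.1 = "-e"
      · simp [pvStep, pvG, h1]
      · by_cases h2 : p.1 = "-s"
        · simp [pvStep, pvG, h2]
        · by_cases h3 : p.1 = "-o"
          · simp [pvStep, pvG, h3]
          · simp [pvStep, pvG, h1, h2, h3]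
    rw [hstep, ih]
    simp [List.findSome?_append, Option.or_assoc]

-- args.zip args.tail written as a map over the index range
lemma pvZip_eq_map_range (l : List String) :
    l.zip l.tail = (List.range (l.length - 1)).map (fun i => (l.getD i "", l.getD (i + 1) "")) := by
  apply List.ext_getElem
  · simp [List.length_zip, List.length_tail]
  · intro i h1 h2
    have hlen : l.length - 1 ≤ l.length := Nat.sub_le _ _
    have hi : i < l.length - 1 := by simpa using h2
    have hi1 : i < l.length := by omega
    have hi2 : i + 1 < l.length := by omega
    simp [List.getElem_zip, List.getElem_tail, List.getD_eq_getElem?_getD,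
          List.getElem?_eq_getElem hi1, List.getElem?_eq_getElem hi2]

-- B's backward index search = findSome? over the reversed pair list
lemma pvLastValue_eq (args : List String) (f : String) :
    pvLastValue args f = (args.zip args.tail).reverse.findSome? (pvG f) := by
  rw [pvLastValue, pvZip_eq_map_range, ← List.map_reverse, List.findSome?_map]
  rfl

-- ===== VERDICT (by name: the statement is the Claim_ definition above) =====
theorem get_args_values_spec : Claim_equal_get_args_values := by
  intro args _
  unfold Spec_get_args_values get_args_values get_args_values_alt
  simp only []
  have hA := pvA_fold args args [] none none none (by simp)
  simp only [List.length_nil, Nat.cast_zero] at hA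
  rw [hA, pvFold_or]
  simp [pvLastValue_eq]
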